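-- pv_equiv track=rewrite | github.com/walkccc/LeetCode | solutions/576. Out of Boundary Paths/576-2.py | findPaths
-- ===== SOURCE A (Python) =====
-- def findPaths(
--
--     m: int,
--     n: int,
--     maxMove: int,
--     startRow: int,
--     startColumn: int,
-- ) -> int:
--   dirs = ((0, 1), (1, 0), (0, -1), (-1, 0))
--   kMod = 1_000_000_007
--   ans = 0
--   # dp[i][j] := the number of paths to move the ball (i, j) out-of-bounds
--   dp = [[0] * n for _ in range(m)]
--   dp[startRow][startColumn] = 1
--
--   for _ in range(maxMove):
--     newDp = [[0] * n for _ in range(m)]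
--     for i in range(m):
--       for j in range(n):
--         if dp[i][j] > 0:
--           for dx, dy in dirs:
--             x = i + dx
--             y = j + dy
--             if x < 0 or x == m or y < 0 or y == n:
--               ans = (ans + dp[i][j]) % kMod
--             else:
--               newDp[x][y] = (newDp[x][y] + dp[i][j]) % kMod
--     dp = newDp
--
--   return ans
-- ===== SOURCE B (Python) =====
-- def findPaths(
--     m: int,
--     n: int,
--     maxMove: int,
--     startRow: int,
--     startColumn: int,
-- ) -> int:
--   kMod = 1_000_000_007
--   # exit[i][j] := number of paths that take the ball from (i, j) out of bounds
--   # using at most `moves` moves, computed by backward value iteration.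
--   exitCnt = [[0] * n for _ in range(m)]
--   for _ in range(maxMove):
--     exitCnt = [
--         [sum(1 if x < 0 or x >= m or y < 0 or y >= n else exitCnt[x][y]
--              for x, y in ((i, j + 1), (i + 1, j), (i, j - 1), (i - 1, j))) % kMod
--          for j in range(n)]
--         for i in range(m)]
--   return exitCnt[startRow][startColumn]
-- ===== Notes on version B (the rewrite author's own statement) =====
-- stated objective: alternative
-- what changed: A propagates the start-cell distribution forward layer by layer, accumulating every boundary crossing into a global counter; B instead runs backward value iteration computing, per cell, the number of exit paths within the remaining move budget, and simply reads the answer off at the start cell.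
import Mathlib
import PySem

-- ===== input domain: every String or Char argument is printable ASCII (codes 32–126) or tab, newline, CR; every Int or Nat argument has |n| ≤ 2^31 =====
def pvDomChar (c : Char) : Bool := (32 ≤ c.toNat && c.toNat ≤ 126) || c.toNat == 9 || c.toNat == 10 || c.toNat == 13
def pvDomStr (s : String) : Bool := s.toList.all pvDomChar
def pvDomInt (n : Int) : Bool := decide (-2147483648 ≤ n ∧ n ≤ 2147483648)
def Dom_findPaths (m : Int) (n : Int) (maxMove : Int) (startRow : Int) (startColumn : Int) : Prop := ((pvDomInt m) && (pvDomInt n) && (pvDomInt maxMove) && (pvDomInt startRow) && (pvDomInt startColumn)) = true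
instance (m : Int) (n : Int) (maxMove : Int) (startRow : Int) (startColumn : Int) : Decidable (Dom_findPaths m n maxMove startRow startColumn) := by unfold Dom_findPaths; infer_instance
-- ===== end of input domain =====

-- B replaces A's forward layer propagation with an accumulating counter by backward
-- value iteration on per-cell exit counts, reading the answer at the start cell
-- (objective: alternative decomposition, same asymptotic cost; return value only, no mutation).

-- ===== PORT A =====
-- 2D list indexing/assignment helpers, ported by hand (PySem has no list item
-- assignment): exact for the in-range indices the loops produce (the `getD`/`set`
-- defaults are never reached on indices admitted by Pre_/the range loops).
def pvGet2 (g : List (List Int)) (i j : Nat) : Int := (g.getD i []).getD j 0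

def pvSet2 (g : List (List Int)) (i j : Nat) (v : Int) : List (List Int) :=
  g.set i ((g.getD i []).set j v)

-- Python's negative-index normalisation (exact for -len ≤ i < len, which Pre_ guarantees)
def pvNorm (len : Nat) (i : Int) : Nat := (if i < 0 then i + len else i).toNat

def pvDirs : List (Int × Int) := [(0, 1), (1, 0), (0, -1), (-1, 0)]

-- body of A's innermost `if dp[i][j] > 0: for dx, dy in dirs: ...`
def pvAcell (m n : Int) (dp : List (List Int)) (i j : Int)
    (st : Int × List (List Int)) : Int × List (List Int) :=
  if pvGet2 dp i.toNat j.toNat > 0 then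
    pvDirs.foldl (fun st3 d =>
      let x := i + d.1
      let y := j + d.2
      if x < 0 ∨ x = m ∨ y < 0 ∨ y = n then
        ((st3.1 + pvGet2 dp i.toNat j.toNat) % 1000000007, st3.2)
      else
        (st3.1, pvSet2 st3.2 x.toNat y.toNat
          ((pvGet2 st3.2 x.toNat y.toNat + pvGet2 dp i.toNat j.toNat) % 1000000007))) st
  else st

-- body of A's `for _ in range(maxMove)`: fresh newDp, double loop, dp := newDp
def pvAmove (m n : Int) (st : Int × List (List Int)) : Int × List (List Int) :=
  (PySem.List.pyRange 0 m 1).foldl (fun st1 i =>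
    (PySem.List.pyRange 0 n 1).foldl (fun st2 j => pvAcell m n st.2 i j st2) st1)
    (st.1, List.replicate m.toNat (List.replicate n.toNat 0))

def findPaths (m : Int) (n : Int) (maxMove : Int) (startRow : Int) (startColumn : Int) : Int :=
  let dp0 : List (List Int) := List.replicate m.toNat (List.replicate n.toNat 0)
  let dp1 := pvSet2 dp0 (pvNorm m.toNat startRow) (pvNorm n.toNat startColumn) 1
  ((PySem.List.pyRange 0 maxMove 1).foldl (fun st _ => pvAmove m n st) ((0 : Int), dp1)).1

-- ===== PORT B =====
-- one backward value-iteration step: new exit-count grid from the old one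
def pvBmove (m n : Int) (e : List (List Int)) : List (List Int) :=
  (PySem.List.pyRange 0 m 1).map (fun i =>
    (PySem.List.pyRange 0 n 1).map (fun j =>
      ([(i, j + 1), (i + 1, j), (i, j - 1), (i - 1, j)].map (fun q =>
        if q.1 < 0 ∨ q.1 ≥ m ∨ q.2 < 0 ∨ q.2 ≥ n then (1 : Int)
        else pvGet2 e q.1.toNat q.2.toNat)).sum % 1000000007))

def findPaths_alt (m : Int) (n : Int) (maxMove : Int) (startRow : Int) (startColumn : Int) : Int :=
  let e0 : List (List Int) := List.replicate m.toNat (List.replicate n.toNat 0)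
  let eT := (PySem.List.pyRange 0 maxMove 1).foldl (fun e _ => pvBmove m n e) e0
  pvGet2 eT (pvNorm m.toNat startRow) (pvNorm n.toNat startColumn)

-- ===== PRECONDITION & SPEC =====
-- Pre_ excludes exactly the inputs where Python A raises IndexError on
-- dp[startRow][startColumn]: empty grids (m ≤ 0 or n ≤ 0) and start indices
-- outside Python's valid (wrap-around) range [-m, m) × [-n, n).
def Pre_findPaths (m : Int) (n : Int) (maxMove : Int) (startRow : Int) (startColumn : Int) : Prop :=
  1 ≤ m ∧ 1 ≤ n ∧ -m ≤ startRow ∧ startRow < m ∧ -n ≤ startColumn ∧ startColumn < n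
instance (m : Int) (n : Int) (maxMove : Int) (startRow : Int) (startColumn : Int) : Decidable (Pre_findPaths m n maxMove startRow startColumn) := by unfold Pre_findPaths; infer_instance

def pvWitness_findPaths : Int × Int × Int × Int × Int := (2, 3, 4, 0, -1)

def Spec_findPaths (m : Int) (n : Int) (maxMove : Int) (startRow : Int) (startColumn : Int) (out : Int) : Prop := out = findPaths_alt m n maxMove startRow startColumn
instance (m : Int) (n : Int) (maxMove : Int) (startRow : Int) (startColumn : Int) (out : Int) : Decidable (Spec_findPaths m n maxMove startRow startColumn out) := by unfold Spec_findPaths; infer_instance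

-- ===== CLAIM (what is proved, stated in full; the proofs are below) =====
def Claim_equal_findPaths : Prop := ∀ (m : Int) (n : Int) (maxMove : Int) (startRow : Int) (startColumn : Int), Dom_findPaths m n maxMove startRow startColumn → Pre_findPaths m n maxMove startRow startColumn → Spec_findPaths m n maxMove startRow startColumn (findPaths m n maxMove startRow startColumn)

-- ===== LEMMAS AND PROOFS =====
-- ---- proof-level abstractions ----
abbrev pvZ := ZMod 1000000007

def pvInb (m n : Int) (q : Int × Int) : Bool := decide (0 ≤ q.1 ∧ q.1 < m ∧ 0 ≤ q.2 ∧ q.2 < n)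

def pvNb (q d : Int × Int) : Int × Int := (q.1 + d.1, q.2 + d.2)

def pvVal (g : List (List Int)) (q : Int × Int) : pvZ := ((pvGet2 g q.1.toNat q.2.toNat : Int) : pvZ)

-- exit-count semantics: pvE m n t q = #paths from q out of the m×n grid in ≤ t moves (mod p)
def pvE (m n : Int) : Nat → (Int × Int) → pvZ
  | 0, _ => 0
  | t+1, q => (pvDirs.map (fun d => if pvInb m n (pvNb q d) then pvE m n t (pvNb q d) else 1)).sum

def pvShape (m n : Int) (g : List (List Int)) : Prop :=
  g.length = m.toNat ∧ ∀ r ∈ g, r.length = n.toNat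

def pvGood (g : List (List Int)) : Prop :=
  ∀ i j : Nat, 0 ≤ pvGet2 g i j ∧ pvGet2 g i j < 1000000007

noncomputable def pvG (m n : Int) : Finset (Int × Int) := (Finset.Ico 0 m) ×ˢ (Finset.Ico 0 n)

def pvOutL (m n : Int) (c : Int × Int) (ds : List (Int × Int)) : pvZ :=
  (ds.map (fun d => if pvInb m n (pvNb c d) then (0:pvZ) else 1)).sum

def pvIncL (m n : Int) (v : pvZ) (c : Int × Int) (ds : List (Int × Int)) (q : Int × Int) : pvZ :=
  (ds.map (fun d => if q = pvNb c d ∧ pvInb m n q then v else 0)).sum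

-- ---- basic facts ----
lemma pvCastMod (a : Int) : ((a % 1000000007 : Int) : pvZ) = (a : pvZ) := by
  have := ZMod.intCast_mod a 1000000007; push_cast at this ⊢; exact this

lemma pvModBounds (a : Int) : 0 ≤ a % 1000000007 ∧ a % 1000000007 < 1000000007 :=
  ⟨Int.emod_nonneg a (by norm_num), Int.emod_lt_of_pos a (by norm_num)⟩

lemma pvGet2_zero (M N : Nat) (i j : Nat) :
    pvGet2 (List.replicate M (List.replicate N 0)) i j = 0 := by
  unfold pvGet2
  rcases lt_or_ge i M with h | h
  · rcases lt_or_ge j N with h2 | h2 <;> simp [List.getD, h, h2]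
  · simp [List.getD, Nat.not_lt.2 h]

lemma pvShape_zero (m n : Int) :
    pvShape m n (List.replicate m.toNat (List.replicate n.toNat 0)) := by
  constructor
  · simp
  · intro r hr; simp at hr; simp [hr.2]

lemma pvGood_zero (M N : Nat) : pvGood (List.replicate M (List.replicate N 0)) := by
  intro i j; rw [pvGet2_zero]; omega

lemma pvGet2_pvSet2 (g : List (List Int)) (a b : Nat) (v : Int) (x y : Nat)
    (ha : a < g.length) (hb : b < (g.getD a []).length) :
    pvGet2 (pvSet2 g a b v) x y = if x = a ∧ y = b then v else pvGet2 g x y := by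
  unfold pvGet2 pvSet2
  rcases eq_or_ne x a with rfl | hx
  · rw [show (g.set x ((g.getD x []).set b v)).getD x [] = (g.getD x []).set b v by
      simp [List.getD, ha]]
    rcases eq_or_ne y b with rfl | hy
    · simp only [List.getD] at hb ⊢
      simp [hb]
    · simp [hy, List.getD, List.getElem?_set_ne (Ne.symm hy)]
  · simp [hx, List.getD, List.getElem?_set_ne fun h => hx h.symm]

lemma pvSet2_of_ge (g : List (List Int)) (a b : Nat) (v : Int) (ha : g.length ≤ a) :
    pvSet2 g a b v = g := by
  unfold pvSet2; exact List.set_eq_of_length_le ha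

lemma pvSet2_row_of_ge (g : List (List Int)) (a b : Nat) (v : Int)
    (ha : a < g.length) (hb : (g.getD a []).length ≤ b) : pvSet2 g a b v = g := by
  unfold pvSet2
  rw [List.set_eq_of_length_le hb, List.getD_eq_getElem g [] ha, List.set_getElem_self]

lemma pvShape_pvSet2 (m n : Int) (g : List (List Int)) (a b : Nat) (v : Int)
    (h : pvShape m n g) : pvShape m n (pvSet2 g a b v) := by
  rcases lt_or_ge a g.length with hlt | hge
  swap
  · rw [pvSet2_of_ge g a b v hge]; exact h
  obtain ⟨h1, h2⟩ := h
  refine ⟨by simpa [pvSet2] using h1, ?_⟩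
  intro r hr
  unfold pvSet2 at hr
  rcases List.mem_or_eq_of_mem_set hr with h3 | rfl
  · exact h2 r h3
  · rw [List.length_set]
    exact h2 _ (by simp [List.getD, hlt])

lemma pvGood_pvSet2 (g : List (List Int)) (a b : Nat) (v : Int)
    (hg : pvGood g) (hv : 0 ≤ v ∧ v < 1000000007) : pvGood (pvSet2 g a b v) := by
  intro x y
  rcases lt_or_ge a g.length with ha | ha
  · rcases lt_or_ge b (g.getD a []).length with hb | hb
    · rw [pvGet2_pvSet2 g a b v x y ha hb]; split
      · exact hv
      · exact hg x y
    · rw [pvSet2_row_of_ge g a b v ha hb]; exact hg x y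
  · rw [pvSet2_of_ge g a b v ha]; exact hg x y

lemma pvFoldlConst {α β : Type} (l : List α) (f : β → β) (b : β) :
    l.foldl (fun s _ => f s) b = f^[l.length] b := by
  induction l generalizing b with
  | nil => rfl
  | cons x xs ih => simp [List.foldl, ih, Function.iterate_succ_apply]

lemma pvSumPyRange (f : ℤ → pvZ) (a b : ℤ) :
    ((PySem.List.pyRange a b 1).map f).sum = ∑ i ∈ Finset.Ico a b, f i := by
  by_cases hab : b ≤ a
  · rw [PySem.List.pyRange_one_eq_nil hab, Finset.Ico_eq_empty (by omega)]; simp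
  · have hab' : a < b := by omega
    rw [PySem.List.pyRange_one_cons hab',
        ← Finset.insert_Ico_add_one_left_eq_Ico hab',
        Finset.sum_insert (by simp)]
    simp only [List.map_cons, List.sum_cons]
    rw [pvSumPyRange f (a+1) b]
termination_by (b - a).toNat
decreasing_by omega
lemma pvDirBounds (d : Int × Int) (hd : d ∈ pvDirs) :
    (d.1 = 0 ∧ d.2 = 1) ∨ (d.1 = 1 ∧ d.2 = 0) ∨ (d.1 = 0 ∧ d.2 = -1) ∨ (d.1 = -1 ∧ d.2 = 0) := by
  fin_cases hd <;> simp

lemma pvRowLen (m n : Int) (nd : List (List Int)) (hs : pvShape m n nd) (a : Nat)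
    (ha : a < nd.length) : (nd.getD a []).length = n.toNat := by
  exact hs.2 _ (by simp [List.getD, ha])

lemma pvAfold (m n : Int) (dp : List (List Int)) (i j : Int)
    (hi : 0 ≤ i ∧ i < m) (hj : 0 ≤ j ∧ j < n) (hdp : pvGood dp) :
    ∀ (ds : List (Int × Int)), (∀ d ∈ ds, d ∈ pvDirs) →
    ∀ (ans : Int) (nd : List (List Int)), pvShape m n nd → pvGood nd →
      0 ≤ ans → ans < 1000000007 →
      (pvShape m n (ds.foldl (fun st3 d =>
        let x := i + d.1
        let y := j + d.2
        if x < 0 ∨ x = m ∨ y < 0 ∨ y = n then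
          ((st3.1 + pvGet2 dp i.toNat j.toNat) % 1000000007, st3.2)
        else
          (st3.1, pvSet2 st3.2 x.toNat y.toNat
            ((pvGet2 st3.2 x.toNat y.toNat + pvGet2 dp i.toNat j.toNat) % 1000000007))) (ans, nd)).2) ∧
      pvGood ((ds.foldl (fun st3 d =>
        let x := i + d.1
        let y := j + d.2
        if x < 0 ∨ x = m ∨ y < 0 ∨ y = n then
          ((st3.1 + pvGet2 dp i.toNat j.toNat) % 1000000007, st3.2)
        else
          (st3.1, pvSet2 st3.2 x.toNat y.toNat
            ((pvGet2 st3.2 x.toNat y.toNat + pvGet2 dp i.toNat j.toNat) % 1000000007))) (ans, nd)).2) ∧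
      0 ≤ ((ds.foldl (fun st3 d =>
        let x := i + d.1
        let y := j + d.2
        if x < 0 ∨ x = m ∨ y < 0 ∨ y = n then
          ((st3.1 + pvGet2 dp i.toNat j.toNat) % 1000000007, st3.2)
        else
          (st3.1, pvSet2 st3.2 x.toNat y.toNat
            ((pvGet2 st3.2 x.toNat y.toNat + pvGet2 dp i.toNat j.toNat) % 1000000007))) (ans, nd)).1) ∧
      ((ds.foldl (fun st3 d =>
        let x := i + d.1
        let y := j + d.2
        if x < 0 ∨ x = m ∨ y < 0 ∨ y = n then
          ((st3.1 + pvGet2 dp i.toNat j.toNat) % 1000000007, st3.2)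
        else
          (st3.1, pvSet2 st3.2 x.toNat y.toNat
            ((pvGet2 st3.2 x.toNat y.toNat + pvGet2 dp i.toNat j.toNat) % 1000000007))) (ans, nd)).1) < 1000000007 ∧
      ((((ds.foldl (fun st3 d =>
        let x := i + d.1
        let y := j + d.2
        if x < 0 ∨ x = m ∨ y < 0 ∨ y = n then
          ((st3.1 + pvGet2 dp i.toNat j.toNat) % 1000000007, st3.2)
        else
          (st3.1, pvSet2 st3.2 x.toNat y.toNat
            ((pvGet2 st3.2 x.toNat y.toNat + pvGet2 dp i.toNat j.toNat) % 1000000007))) (ans, nd)).1 : Int) : pvZ)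
        = (ans : pvZ) + pvVal dp (i, j) * pvOutL m n (i, j) ds) ∧
      (∀ q : Int × Int, pvInb m n q = true →
        pvVal ((ds.foldl (fun st3 d =>
        let x := i + d.1
        let y := j + d.2
        if x < 0 ∨ x = m ∨ y < 0 ∨ y = n then
          ((st3.1 + pvGet2 dp i.toNat j.toNat) % 1000000007, st3.2)
        else
          (st3.1, pvSet2 st3.2 x.toNat y.toNat
            ((pvGet2 st3.2 x.toNat y.toNat + pvGet2 dp i.toNat j.toNat) % 1000000007))) (ans, nd)).2) q
          = pvVal nd q + pvIncL m n (pvVal dp (i, j)) (i, j) ds q) := by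
  intro ds
  induction ds with
  | nil =>
    intro _ ans nd hs hg h0 h1
    simp [pvOutL, pvIncL]
    exact ⟨hs, hg, h0, h1⟩
  | cons d ds ih =>
    intro hmem ans nd hs hg h0 h1
    have hd := pvDirBounds d (hmem d (by simp))
    have hw := hdp i.toNat j.toNat
    set w := pvGet2 dp i.toNat j.toNat with hwdef
    have hvw : pvVal dp (i, j) = ((w : Int) : pvZ) := rfl
    simp only [List.foldl_cons]
    by_cases hguard : i + d.1 < 0 ∨ i + d.1 = m ∨ j + d.2 < 0 ∨ j + d.2 = n
    · -- out-of-bounds direction: ans accumulates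
      have hnb : pvInb m n (pvNb (i, j) d) = false := by
        simp only [pvInb, pvNb, decide_eq_false_iff_not]
        omega
      have hb := pvModBounds (ans + w)
      have := ih (fun d' hd' => hmem d' (by simp [hd'])) ((ans + w) % 1000000007) nd hs hg hb.1 hb.2
      simp only [if_pos hguard]
      refine ⟨this.1, this.2.1, this.2.2.1, this.2.2.2.1, ?_, ?_⟩
      · rw [this.2.2.2.2.1, pvCastMod]
        simp only [pvOutL, List.map_cons, List.sum_cons, hnb]
        rw [hvw]
        push_cast
        ring
      · intro q hq
        rw [this.2.2.2.2.2 q hq]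
        simp only [pvIncL, List.map_cons, List.sum_cons]
        have hterm : ¬(q = pvNb (i, j) d ∧ (pvInb m n q : Prop)) := by
          rintro ⟨rfl, _⟩
          rw [hnb] at hq; exact Bool.false_ne_true hq
        rw [if_neg hterm]
        ring
    · -- in-bounds direction: newDp cell updated
      have hx : 0 ≤ i + d.1 ∧ i + d.1 < m := by omega
      have hy : 0 ≤ j + d.2 ∧ j + d.2 < n := by omega
      have hxa : (i + d.1).toNat < nd.length := by rw [hs.1]; omega
      have hyb : (j + d.2).toNat < (nd.getD (i + d.1).toNat []).length := by
        rw [pvRowLen m n nd hs _ hxa]; omega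
      have hgold := hg (i + d.1).toNat (j + d.2).toNat
      have hbnd := pvModBounds (pvGet2 nd (i + d.1).toNat (j + d.2).toNat + w)
      have hs' := pvShape_pvSet2 m n nd (i + d.1).toNat (j + d.2).toNat ((pvGet2 nd (i + d.1).toNat (j + d.2).toNat + w) % 1000000007) hs
      have hg' := pvGood_pvSet2 nd (i + d.1).toNat (j + d.2).toNat ((pvGet2 nd (i + d.1).toNat (j + d.2).toNat + w) % 1000000007) hg hbnd
      have := ih (fun d' hd' => hmem d' (by simp [hd'])) ans _ hs' hg' h0 h1
      simp only [if_neg hguard]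
      refine ⟨this.1, this.2.1, this.2.2.1, this.2.2.2.1, ?_, ?_⟩
      · rw [this.2.2.2.2.1]
        have hnb : pvInb m n (pvNb (i, j) d) = true := by
          simp only [pvInb, pvNb, decide_eq_true_eq]
          omega
        simp only [pvOutL, List.map_cons, List.sum_cons, hnb, if_pos]
        ring
      · intro q hq
        rw [this.2.2.2.2.2 q hq]
        have hq' : 0 ≤ q.1 ∧ q.1 < m ∧ 0 ≤ q.2 ∧ q.2 < n := by
          simpa [pvInb] using hq
        simp only [pvIncL, List.map_cons, List.sum_cons]
        have hget := pvGet2_pvSet2 nd (i + d.1).toNat (j + d.2).toNat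
          ((pvGet2 nd (i + d.1).toNat (j + d.2).toNat + w) % 1000000007) q.1.toNat q.2.toNat hxa hyb
        by_cases hcase : q = pvNb (i, j) d
        · have hqe : q.1 = i + d.1 ∧ q.2 = j + d.2 := by
            rw [hcase]; exact ⟨rfl, rfl⟩
          have : q.1.toNat = (i + d.1).toNat ∧ q.2.toNat = (j + d.2).toNat := by omega
          rw [show pvVal (pvSet2 nd (i + d.1).toNat (j + d.2).toNat
              ((pvGet2 nd (i + d.1).toNat (j + d.2).toNat + w) % 1000000007)) q
            = (((pvGet2 nd (i + d.1).toNat (j + d.2).toNat + w) % 1000000007 : Int) : pvZ) by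
            unfold pvVal; rw [hget, if_pos this]]
          rw [pvCastMod, if_pos ⟨hcase, by rw [hq]⟩]
          have hvnd : pvVal nd q = ((pvGet2 nd (i + d.1).toNat (j + d.2).toNat : Int) : pvZ) := by
            unfold pvVal; rw [this.1, this.2]
          rw [hvnd, hvw]
          push_cast
          ring
        · have hne : ¬(q.1.toNat = (i + d.1).toNat ∧ q.2.toNat = (j + d.2).toNat) := by
            intro hcon
            apply hcase
            have e1 : q.1 = i + d.1 := by omega
            have e2 : q.2 = j + d.2 := by omega
            simp [pvNb, ← e1, ← e2]
          rw [show pvVal (pvSet2 nd (i + d.1).toNat (j + d.2).toNat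
              ((pvGet2 nd (i + d.1).toNat (j + d.2).toNat + w) % 1000000007)) q = pvVal nd q by
            unfold pvVal; rw [hget, if_neg hne]]
          rw [if_neg (fun hcon => hcase hcon.1)]
          ring
def pvSt (m n : Int) (st : Int × List (List Int)) : Prop :=
  pvShape m n st.2 ∧ pvGood st.2 ∧ 0 ≤ st.1 ∧ st.1 < 1000000007

lemma pvIncL_zero (m n : Int) (c : Int × Int) (ds : List (Int × Int)) (q : Int × Int) :
    pvIncL m n 0 c ds q = 0 := by
  unfold pvIncL
  induction ds with
  | nil => simp
  | cons d ds ih => simp [ih]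

lemma pvAcell_spec (m n : Int) (dp : List (List Int)) (i j : Int)
    (hi : 0 ≤ i ∧ i < m) (hj : 0 ≤ j ∧ j < n) (hdp : pvGood dp)
    (st : Int × List (List Int)) (hst : pvSt m n st) :
    pvSt m n (pvAcell m n dp i j st) ∧
    (((pvAcell m n dp i j st).1 : pvZ) = (st.1 : pvZ) + pvVal dp (i, j) * pvOutL m n (i, j) pvDirs) ∧
    (∀ q : Int × Int, pvInb m n q = true →
      pvVal (pvAcell m n dp i j st).2 q = pvVal st.2 q + pvIncL m n (pvVal dp (i, j)) (i, j) pvDirs q) := by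
  obtain ⟨ans, nd⟩ := st
  obtain ⟨hs, hg, h0, h1⟩ := hst
  unfold pvAcell
  by_cases h : pvGet2 dp i.toNat j.toNat > 0
  · rw [if_pos h]
    have := pvAfold m n dp i j hi hj hdp pvDirs (fun d hd => hd) ans nd hs hg h0 h1
    exact ⟨⟨this.1, this.2.1, this.2.2.1, this.2.2.2.1⟩, this.2.2.2.2.1, this.2.2.2.2.2⟩
  · rw [if_neg h]
    have hz : pvGet2 dp i.toNat j.toNat = 0 := by
      have := (hdp i.toNat j.toNat).1; omega
    have hv : pvVal dp (i, j) = 0 := by unfold pvVal; rw [hz]; simp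
    refine ⟨⟨hs, hg, h0, h1⟩, by rw [hv]; ring, ?_⟩
    intro q _
    rw [hv, pvIncL_zero]
    ring

lemma pvRowFold (m n : Int) (dp : List (List Int)) (i : Int)
    (hi : 0 ≤ i ∧ i < m) (hdp : pvGood dp) :
    ∀ (js : List Int), (∀ j ∈ js, 0 ≤ j ∧ j < n) →
    ∀ (st : Int × List (List Int)), pvSt m n st →
      pvSt m n (js.foldl (fun st2 j => pvAcell m n dp i j st2) st) ∧
      (((js.foldl (fun st2 j => pvAcell m n dp i j st2) st).1 : pvZ)
        = (st.1 : pvZ) + (js.map (fun j => pvVal dp (i, j) * pvOutL m n (i, j) pvDirs)).sum) ∧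
      (∀ q : Int × Int, pvInb m n q = true →
        pvVal (js.foldl (fun st2 j => pvAcell m n dp i j st2) st).2 q
          = pvVal st.2 q + (js.map (fun j => pvIncL m n (pvVal dp (i, j)) (i, j) pvDirs q)).sum) := by
  intro js
  induction js with
  | nil =>
    intro _ st hst
    refine ⟨hst, ?_, fun q _ => ?_⟩ <;> simp
  | cons j js ih =>
    intro hmem st hst
    have hj := hmem j (by simp)
    have hc := pvAcell_spec m n dp i j hi hj hdp st hst
    have := ih (fun j' hj' => hmem j' (by simp [hj'])) (pvAcell m n dp i j st) hc.1
    simp only [List.foldl_cons, List.map_cons, List.sum_cons]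
    refine ⟨this.1, ?_, ?_⟩
    · rw [this.2.1, hc.2.1]; ring
    · intro q hq
      rw [this.2.2 q hq, hc.2.2 q hq]; ring

lemma pvGridFold (m n : Int) (dp : List (List Int)) (hdp : pvGood dp) :
    ∀ (is : List Int), (∀ i ∈ is, 0 ≤ i ∧ i < m) →
    ∀ (st : Int × List (List Int)), pvSt m n st →
      pvSt m n (is.foldl (fun st1 i =>
        (PySem.List.pyRange 0 n 1).foldl (fun st2 j => pvAcell m n dp i j st2) st1) st) ∧
      (((is.foldl (fun st1 i =>
        (PySem.List.pyRange 0 n 1).foldl (fun st2 j => pvAcell m n dp i j st2) st1) st).1 : pvZ)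
        = (st.1 : pvZ) + (is.map (fun i =>
            ((PySem.List.pyRange 0 n 1).map (fun j => pvVal dp (i, j) * pvOutL m n (i, j) pvDirs)).sum)).sum) ∧
      (∀ q : Int × Int, pvInb m n q = true →
        pvVal (is.foldl (fun st1 i =>
          (PySem.List.pyRange 0 n 1).foldl (fun st2 j => pvAcell m n dp i j st2) st1) st).2 q
          = pvVal st.2 q + (is.map (fun i =>
              ((PySem.List.pyRange 0 n 1).map (fun j => pvIncL m n (pvVal dp (i, j)) (i, j) pvDirs q)).sum)).sum) := by
  intro is
  induction is with
  | nil =>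
    intro _ st hst
    refine ⟨hst, ?_, fun q _ => ?_⟩ <;> simp
  | cons i is ih =>
    intro hmem st hst
    have hi := hmem i (by simp)
    have hjs : ∀ j ∈ PySem.List.pyRange 0 n 1, 0 ≤ j ∧ j < n := by
      intro j hj; rw [PySem.List.mem_pyRange_one] at hj; exact hj
    have hr := pvRowFold m n dp i hi hdp (PySem.List.pyRange 0 n 1) hjs st hst
    have := ih (fun i' hi' => hmem i' (by simp [hi'])) _ hr.1
    simp only [List.foldl_cons, List.map_cons, List.sum_cons]
    refine ⟨this.1, ?_, ?_⟩
    · rw [this.2.1, hr.2.1]; ring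
    · intro q hq
      rw [this.2.2 q hq, hr.2.2 q hq]; ring

lemma pvAmove_spec (m n : Int) (st : Int × List (List Int))
    (hdp : pvGood st.2) (h0 : 0 ≤ st.1) (h1 : st.1 < 1000000007) :
    pvSt m n (pvAmove m n st) ∧
    (((pvAmove m n st).1 : pvZ) = (st.1 : pvZ) + ((PySem.List.pyRange 0 m 1).map (fun i =>
        ((PySem.List.pyRange 0 n 1).map (fun j => pvVal st.2 (i, j) * pvOutL m n (i, j) pvDirs)).sum)).sum) ∧
    (∀ q : Int × Int, pvInb m n q = true →
      pvVal (pvAmove m n st).2 q = ((PySem.List.pyRange 0 m 1).map (fun i =>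
        ((PySem.List.pyRange 0 n 1).map (fun j => pvIncL m n (pvVal st.2 (i, j)) (i, j) pvDirs q)).sum)).sum) := by
  unfold pvAmove
  have his : ∀ i ∈ PySem.List.pyRange 0 m 1, 0 ≤ i ∧ i < m := by
    intro i hi; rw [PySem.List.mem_pyRange_one] at hi; exact hi
  have hst0 : pvSt m n (st.1, List.replicate m.toNat (List.replicate n.toNat 0)) :=
    ⟨pvShape_zero m n, pvGood_zero _ _, h0, h1⟩
  have := pvGridFold m n st.2 hdp (PySem.List.pyRange 0 m 1) his
    (st.1, List.replicate m.toNat (List.replicate n.toNat 0)) hst0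
  refine ⟨this.1, this.2.1, ?_⟩
  intro q hq
  have := this.2.2 q hq
  rw [this]
  have hz : pvVal (st.1, List.replicate m.toNat (List.replicate n.toNat 0)).2 q = 0 := by
    unfold pvVal; simp [pvGet2_zero]
  rw [hz]; ring
lemma pvMemG (m n : Int) (q : Int × Int) : q ∈ pvG m n ↔ pvInb m n q = true := by
  simp [pvG, Finset.mem_product, Finset.mem_Ico, pvInb]
  tauto

lemma pvBmove_entry (m n : Int) (g : List (List Int)) (x y : Nat)
    (hx : (x : Int) < m) (hy : (y : Int) < n) :
    pvGet2 (pvBmove m n g) x y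
      = ([((x : Int), (y : Int) + 1), ((x : Int) + 1, (y : Int)),
          ((x : Int), (y : Int) - 1), ((x : Int) - 1, (y : Int))].map (fun q =>
            if q.1 < 0 ∨ q.1 ≥ m ∨ q.2 < 0 ∨ q.2 ≥ n then (1 : Int)
            else pvGet2 g q.1.toNat q.2.toNat)).sum % 1000000007 := by
  unfold pvGet2 pvBmove
  have hx' : x < ((PySem.List.pyRange 0 m 1).map (fun i =>
      (PySem.List.pyRange 0 n 1).map (fun j =>
        ([(i, j + 1), (i + 1, j), (i, j - 1), (i - 1, j)].map (fun q =>
          if q.1 < 0 ∨ q.1 ≥ m ∨ q.2 < 0 ∨ q.2 ≥ n then (1 : Int)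
          else pvGet2 g q.1.toNat q.2.toNat)).sum % 1000000007))).length := by
    simp [PySem.List.length_pyRange_one]; omega
  rw [List.getD_eq_getElem _ _ hx']
  simp only [List.getElem_map]
  rw [PySem.List.getElem_pyRange_one]
  have hy' : y < ((PySem.List.pyRange 0 n 1).map (fun j =>
      ([((0 : Int) + (x : Int), j + 1), ((0 : Int) + (x : Int) + 1, j),
        ((0 : Int) + (x : Int), j - 1), ((0 : Int) + (x : Int) - 1, j)].map (fun q =>
          if q.1 < 0 ∨ q.1 ≥ m ∨ q.2 < 0 ∨ q.2 ≥ n then (1 : Int)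
          else pvGet2 g q.1.toNat q.2.toNat)).sum % 1000000007)).length := by
    simp [PySem.List.length_pyRange_one]; omega
  rw [List.getD_eq_getElem _ _ hy']
  simp only [List.getElem_map]
  rw [PySem.List.getElem_pyRange_one]
  norm_num
  simp [pvGet2, List.getD]

lemma pvBmove_shape (m n : Int) (g : List (List Int)) : pvShape m n (pvBmove m n g) := by
  constructor
  · simp [pvBmove, PySem.List.length_pyRange_one]
  · intro r hr
    simp only [pvBmove, List.mem_map] at hr
    obtain ⟨i, _, rfl⟩ := hr
    simp [PySem.List.length_pyRange_one]

lemma pvBmove_good (m n : Int) (g : List (List Int)) : pvGood (pvBmove m n g) := by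
  intro x y
  rcases lt_or_ge (x : Int) m with hx | hx
  · rcases lt_or_ge (y : Int) n with hy | hy
    · rw [pvBmove_entry m n g x y hx hy]
      exact ⟨(pvModBounds _).1, (pvModBounds _).2⟩
    · have hlen : ((pvBmove m n g).getD x []).length ≤ y := by
        rcases lt_or_ge x (pvBmove m n g).length with h | h
        · rw [pvRowLen m n _ (pvBmove_shape m n g) x h]; omega
        · rw [List.getD_eq_default _ _ (by omega)]; simp
      unfold pvGet2
      rw [List.getD_eq_default ((pvBmove m n g).getD x []) (0:Int) hlen]
      norm_num
  · have hxl : (pvBmove m n g).length ≤ x := by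
      simp only [pvBmove, List.length_map, PySem.List.length_pyRange_one]; omega
    unfold pvGet2
    rw [List.getD_eq_default (pvBmove m n g) ([] : List Int) hxl]
    norm_num

lemma pvBmove_val (m n : Int) (g : List (List Int)) (q : Int × Int) (hq : pvInb m n q = true) :
    pvVal (pvBmove m n g) q
      = (pvDirs.map (fun d => if pvInb m n (pvNb q d) then pvVal g (pvNb q d) else 1)).sum := by
  have hq' : 0 ≤ q.1 ∧ q.1 < m ∧ 0 ≤ q.2 ∧ q.2 < n := by simpa [pvInb] using hq
  unfold pvVal
  rw [pvBmove_entry m n g q.1.toNat q.2.toNat (by omega) (by omega), pvCastMod]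
  have e1 : ((q.1.toNat : Nat) : Int) = q.1 := by omega
  have e2 : ((q.2.toNat : Nat) : Int) = q.2 := by omega
  rw [e1, e2]
  simp only [pvDirs, pvNb, List.map_cons, List.map_nil, List.sum_cons, List.sum_nil, pvVal]
  simp only [add_zero, ← sub_eq_add_neg]
  push_cast
  have conv : ∀ a b : Int, (if a < 0 ∨ a ≥ m ∨ b < 0 ∨ b ≥ n then (1 : pvZ)
      else ((pvGet2 g a.toNat b.toNat : Int) : pvZ))
      = if pvInb m n (a, b) = true then ((pvGet2 g a.toNat b.toNat : Int) : pvZ) else 1 := by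
    intro a b
    by_cases h : a < 0 ∨ a ≥ m ∨ b < 0 ∨ b ≥ n
    · rw [if_pos h, if_neg (by simp only [pvInb, decide_eq_true_eq]; omega)]
    · rw [if_neg h, if_pos (by simp only [pvInb, decide_eq_true_eq]; omega)]
  rw [conv q.1 (q.2 + 1), conv (q.1 + 1) q.2, conv q.1 (q.2 - 1), conv (q.1 - 1) q.2]

lemma pvBiter (m n : Int) (t : Nat) :
    pvShape m n ((pvBmove m n)^[t] (List.replicate m.toNat (List.replicate n.toNat 0))) ∧
    pvGood ((pvBmove m n)^[t] (List.replicate m.toNat (List.replicate n.toNat 0))) ∧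
    (∀ q : Int × Int, pvInb m n q = true →
      pvVal ((pvBmove m n)^[t] (List.replicate m.toNat (List.replicate n.toNat 0))) q = pvE m n t q) := by
  induction t with
  | zero =>
    refine ⟨pvShape_zero m n, pvGood_zero _ _, fun q _ => ?_⟩
    unfold pvVal; simp [pvGet2_zero, pvE]
  | succ t ih =>
    rw [Function.iterate_succ_apply']
    refine ⟨pvBmove_shape m n _, pvBmove_good m n _, fun q hq => ?_⟩
    rw [pvBmove_val m n _ q hq]
    show _ = pvE m n (t + 1) q
    simp only [pvE]
    congr 1
    apply List.map_congr_left
    intro d _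
    by_cases h : pvInb m n (pvNb q d) = true
    · rw [if_pos h, if_pos h, ih.2.2 _ h]
    · rw [if_neg h, if_neg h]
lemma pvCellExchange (m n : Int) (t : Nat) (v : pvZ) (c : Int × Int) :
    v * pvOutL m n c pvDirs + ∑ q ∈ pvG m n, pvIncL m n v c pvDirs q * pvE m n t q
      = v * pvE m n (t + 1) c := by
  have hterm : ∀ (nb q : Int × Int), (if q = nb ∧ pvInb m n q = true then v else 0) * pvE m n t q
      = if q = nb then (if pvInb m n nb = true then v * pvE m n t q else 0) else 0 := by
    intro nb q
    by_cases h1 : q = nb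
    · subst h1
      by_cases h2 : pvInb m n q = true <;> simp [h2]
    · simp [h1]
  simp only [pvE, pvOutL, pvIncL, pvDirs, List.map_cons, List.map_nil, List.sum_cons,
    List.sum_nil, add_zero]
  simp only [add_mul, hterm]
  simp only [Finset.sum_add_distrib, Finset.sum_ite_eq', pvMemG]
  by_cases h1 : pvInb m n (pvNb c (0, 1)) = true <;>
    by_cases h2 : pvInb m n (pvNb c (1, 0)) = true <;>
      by_cases h3 : pvInb m n (pvNb c (0, -1)) = true <;>
        by_cases h4 : pvInb m n (pvNb c (-1, 0)) = true <;>
          simp [h1, h2, h3, h4] <;> ring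

lemma pvSumListG (m n : Int) (f : Int × Int → pvZ) :
    ((PySem.List.pyRange 0 m 1).map (fun i =>
      ((PySem.List.pyRange 0 n 1).map (fun j => f (i, j))).sum)).sum
      = ∑ c ∈ pvG m n, f c := by
  simp only [pvSumPyRange]
  rw [pvG, Finset.sum_product]

lemma pvAiter (m n : Int) (t : Nat) :
    ∀ (st : Int × List (List Int)), pvGood st.2 → 0 ≤ st.1 → st.1 < 1000000007 →
      0 ≤ ((pvAmove m n)^[t] st).1 ∧ ((pvAmove m n)^[t] st).1 < 1000000007 ∧
      ((((pvAmove m n)^[t] st).1 : pvZ)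
        = (st.1 : pvZ) + ∑ c ∈ pvG m n, pvVal st.2 c * pvE m n t c) := by
  induction t with
  | zero =>
    intro st _ h0 h1
    refine ⟨h0, h1, ?_⟩
    simp [pvE]
  | succ t ih =>
    intro st hg h0 h1
    rw [Function.iterate_succ_apply]
    have hm := pvAmove_spec m n st hg h0 h1
    have hih := ih (pvAmove m n st) hm.1.2.1 hm.1.2.2.1 hm.1.2.2.2
    refine ⟨hih.1, hih.2.1, ?_⟩
    rw [hih.2.2, hm.2.1, pvSumListG m n (fun c => pvVal st.2 c * pvOutL m n c pvDirs)]
    have hv : ∀ c ∈ pvG m n, pvVal (pvAmove m n st).2 c * pvE m n t c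
        = (∑ c' ∈ pvG m n, pvIncL m n (pvVal st.2 c') c' pvDirs c) * pvE m n t c := by
      intro c hc
      rw [hm.2.2 c ((pvMemG m n c).1 hc), pvSumListG m n (fun c' => pvIncL m n (pvVal st.2 c') c' pvDirs c)]
    rw [Finset.sum_congr rfl hv]
    simp only [Finset.sum_mul]
    rw [Finset.sum_comm, add_assoc, ← Finset.sum_add_distrib]
    rw [Finset.sum_congr rfl (fun c _ => pvCellExchange m n t (pvVal st.2 c) c)]
lemma pvIntEq (a b : Int) (h0 : 0 ≤ a) (h1 : a < 1000000007)
    (h2 : 0 ≤ b) (h3 : b < 1000000007) (h : (a : pvZ) = (b : pvZ)) : a = b := by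
  rw [ZMod.intCast_eq_intCast_iff] at h
  have h4 : a % ((1000000007 : ℕ) : ℤ) = b % ((1000000007 : ℕ) : ℤ) := h
  norm_num at h4
  omega

lemma pvMain (m n mm sr sc : Int) (hm : 1 ≤ m) (hn : 1 ≤ n)
    (h1 : -m ≤ sr) (h2 : sr < m) (h3 : -n ≤ sc) (h4 : sc < n) :
    findPaths m n mm sr sc = findPaths_alt m n mm sr sc := by
  have ha : pvNorm m.toNat sr < m.toNat ∧ ((pvNorm m.toNat sr : Nat) : Int) = (if sr < 0 then sr + m else sr) := by
    unfold pvNorm; split <;> omega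
  have hb : pvNorm n.toNat sc < n.toNat ∧ ((pvNorm n.toNat sc : Nat) : Int) = (if sc < 0 then sc + n else sc) := by
    unfold pvNorm; split <;> omega
  set a := pvNorm m.toNat sr with hadef
  set b := pvNorm n.toNat sc with hbdef
  set qa : Int × Int := ((a : Int), (b : Int)) with hqadef
  set dp0 : List (List Int) := List.replicate m.toNat (List.replicate n.toNat 0) with hdp0
  set dp1 : List (List Int) := pvSet2 dp0 a b 1 with hdp1
  have ha' : a < dp0.length := by rw [hdp0]; simpa using ha.1
  have hrow : dp0.getD a [] = List.replicate n.toNat 0 := by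
    rw [hdp0, List.getD_eq_getElem _ _ ha', List.getElem_replicate]
  have hb' : b < (dp0.getD a []).length := by rw [hrow]; simpa using hb.1
  have hdp1good : pvGood dp1 := pvGood_pvSet2 dp0 a b 1 (pvGood_zero _ _) (by norm_num)
  have hqaG : qa ∈ pvG m n := by
    rw [pvMemG]
    simp only [pvInb, hqadef, decide_eq_true_eq]
    omega
  -- A's answer
  have hA := pvAiter m n mm.toNat (0, dp1) hdp1good (le_refl 0) (by norm_num)
  have hAval : findPaths m n mm sr sc = ((pvAmove m n)^[mm.toNat] (0, dp1)).1 := by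
    show (List.foldl (fun st _ => pvAmove m n st) ((0 : Int), dp1) (PySem.List.pyRange 0 mm 1)).1 = _
    rw [pvFoldlConst, PySem.List.length_pyRange_one]
    norm_num
  -- B's answer
  have hB := pvBiter m n mm.toNat
  have hBval : findPaths_alt m n mm sr sc
      = pvGet2 ((pvBmove m n)^[mm.toNat] dp0) a b := by
    show pvGet2 (List.foldl (fun e _ => pvBmove m n e) dp0 (PySem.List.pyRange 0 mm 1)) a b = _
    rw [pvFoldlConst, PySem.List.length_pyRange_one]
    norm_num
  -- the delta grid sums to the single exit count at qa
  have hval : ∀ c ∈ pvG m n, pvVal dp1 c * pvE m n mm.toNat c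
      = if c = qa then pvE m n mm.toNat c else 0 := by
    intro c hc
    have hcb : 0 ≤ c.1 ∧ c.1 < m ∧ 0 ≤ c.2 ∧ c.2 < n := by
      simpa [pvInb] using (pvMemG m n c).1 hc
    have hget : pvGet2 dp1 c.1.toNat c.2.toNat
        = if c.1.toNat = a ∧ c.2.toNat = b then 1 else pvGet2 dp0 c.1.toNat c.2.toNat := by
      rw [hdp1]; exact pvGet2_pvSet2 dp0 a b 1 c.1.toNat c.2.toNat ha' hb'
    by_cases hqa : c = qa
    · have : c.1.toNat = a ∧ c.2.toNat = b := by rw [hqa]; simp [hqadef]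
      rw [if_pos hqa]
      unfold pvVal
      rw [hget, if_pos this]
      norm_num
    · have hne : ¬(c.1.toNat = a ∧ c.2.toNat = b) := by
        intro hcon
        apply hqa
        have e1 : c.1 = (a : Int) := by omega
        have e2 : c.2 = (b : Int) := by omega
        rw [hqadef, ← e1, ← e2]
      rw [if_neg hqa]
      unfold pvVal
      rw [hget, if_neg hne, hdp0, pvGet2_zero]
      norm_num
  have hAcast : ((findPaths m n mm sr sc : Int) : pvZ) = pvE m n mm.toNat qa := by
    rw [hAval, hA.2.2]
    rw [Finset.sum_congr rfl hval, Finset.sum_ite_eq' (pvG m n) qa, if_pos hqaG]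
    norm_num
  have hBcast : ((findPaths_alt m n mm sr sc : Int) : pvZ) = pvE m n mm.toNat qa := by
    rw [hBval]
    have := hB.2.2 qa ((pvMemG m n qa).1 hqaG)
    unfold pvVal at this
    simp only [hqadef, Int.toNat_natCast] at this
    rw [← this]
  have hAb : 0 ≤ findPaths m n mm sr sc ∧ findPaths m n mm sr sc < 1000000007 := by
    rw [hAval]; exact ⟨hA.1, hA.2.1⟩
  have hBb : 0 ≤ findPaths_alt m n mm sr sc ∧ findPaths_alt m n mm sr sc < 1000000007 := by
    rw [hBval]; exact hB.2.1 a b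
  exact pvIntEq _ _ hAb.1 hAb.2 hBb.1 hBb.2 (by rw [hAcast, hBcast])

-- ===== VERDICT (by name: the statement is the Claim_ definition above) =====
theorem findPaths_spec : Claim_equal_findPaths := by
  unfold Claim_equal_findPaths
  intro m n maxMove startRow startColumn _ hpre
  obtain ⟨hm, hn, h1, h2, h3, h4⟩ := hpre
  unfold Spec_findPaths
  exact pvMain m n maxMove startRow startColumn hm hn h1 h2 h3 h4
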